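-- pv_equiv track=rewrite | github.com/pat8901/DiskAnalyzer | backend/src/tools.py | binLabelCreator
-- ===== SOURCE A (Python) =====
-- def binLabelCreator(amount, step, start):
--     bin_labels = []
--     # Append starting point
--     bin_labels.append(f"{start}-{step}")
--     left = step  # Set left side of the range to the step i.e. right side
--     for i in range(amount - 1):  # Loop though amount
--         # Append the left side and right side to create a range label
--         bin_labels.append(f"{left}-{left+step}")
--         left = left + step  # Set the left to the right
--     return bin_labels
-- ===== SOURCE B (Python) =====
-- def binLabelCreator(amount, step, start):
--     boundaries = [k * step for k in range(1, amount + 1)]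
--     labels = [f"{start}-{step}"]
--     labels += [f"{a}-{b}" for a, b in zip(boundaries, boundaries[1:])]
--     return labels
-- ===== Notes on version B (the rewrite author's own statement) =====
-- stated objective: alternative
-- what changed: Replaces A's incremental 'left' accumulator loop with a precomputed boundaries table plus a pairwise zip pass, keeping the first label unconditional.
import Mathlib
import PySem

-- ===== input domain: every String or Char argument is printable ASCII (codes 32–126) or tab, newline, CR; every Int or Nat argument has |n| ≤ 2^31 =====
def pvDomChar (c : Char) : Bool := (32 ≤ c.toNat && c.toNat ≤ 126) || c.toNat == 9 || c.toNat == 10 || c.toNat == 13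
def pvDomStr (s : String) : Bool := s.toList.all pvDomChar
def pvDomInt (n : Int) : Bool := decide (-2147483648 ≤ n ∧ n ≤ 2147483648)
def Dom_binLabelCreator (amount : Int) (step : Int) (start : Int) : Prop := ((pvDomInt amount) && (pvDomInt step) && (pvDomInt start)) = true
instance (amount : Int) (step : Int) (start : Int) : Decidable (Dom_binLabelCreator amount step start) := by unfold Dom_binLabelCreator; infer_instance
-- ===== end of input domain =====

-- B builds a boundaries table and zips adjacent pairs instead of A's running 'left' accumulator; same cost, different decomposition.

-- ===== PORT A =====
def binLabelCreator (amount : Int) (step : Int) (start : Int) : List String :=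
  let binLabels : List String := [PySem.Int.toStr start ++ "-" ++ PySem.Int.toStr step]
  let res := (PySem.List.pyRange 0 (amount - 1) 1).foldl
    (fun (st : List String × Int) _ =>
      (st.1 ++ [PySem.Int.toStr st.2 ++ "-" ++ PySem.Int.toStr (st.2 + step)], st.2 + step))
    (binLabels, step)
  res.1

-- ===== PORT B =====
def binLabelCreator_alt (amount : Int) (step : Int) (start : Int) : List String :=
  let boundaries := (PySem.List.pyRange 1 (amount + 1) 1).map (fun k => k * step)
  let labels := [PySem.Int.toStr start ++ "-" ++ PySem.Int.toStr step]
  labels ++ (boundaries.zip (boundaries.drop 1)).map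
    (fun p => PySem.Int.toStr p.1 ++ "-" ++ PySem.Int.toStr p.2)

-- ===== PRECONDITION & SPEC =====
def Spec_binLabelCreator (amount : Int) (step : Int) (start : Int) (out : List String) : Prop := out = binLabelCreator_alt amount step start
instance (amount : Int) (step : Int) (start : Int) (out : List String) : Decidable (Spec_binLabelCreator amount step start out) := by unfold Spec_binLabelCreator; infer_instance

-- ===== CLAIM (what is proved, stated in full; the proofs are below) =====
def Claim_equal_binLabelCreator : Prop := ∀ (amount : Int) (step : Int) (start : Int), Dom_binLabelCreator amount step start → Spec_binLabelCreator amount step start (binLabelCreator amount step start)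

-- ===== LEMMAS AND PROOFS =====

-- closed form: the k-th range label starting from 'left'
def pvLbl (step left : Int) : String := PySem.Int.toStr left ++ "-" ++ PySem.Int.toStr (left + step)

def pvClosed (n : Nat) (step left : Int) : List String :=
  (List.range n).map (fun k : Nat => pvLbl step (left + (k : Int) * step))

lemma pvClosed_succ (n : Nat) (step left : Int) :
    pvClosed (n + 1) step left = pvLbl step left :: pvClosed n step (left + step) := by
  simp only [pvClosed, List.range_succ_eq_map, List.map_cons, List.map_map]
  congr 1
  · norm_num
  · apply List.map_congr_left
    intro a _
    simp only [Function.comp]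
    congr 1
    push_cast
    ring

-- A's loop with running left, over any list of length n, appends the closed-form labels.
lemma aLoop_eq (step : Int) (l : List Int) : ∀ (acc : List String) (left : Int),
    (l.foldl (fun (st : List String × Int) _ =>
      (st.1 ++ [PySem.Int.toStr st.2 ++ "-" ++ PySem.Int.toStr (st.2 + step)], st.2 + step))
      (acc, left)).1
    = acc ++ pvClosed l.length step left := by
  induction l with
  | nil => intro acc left; simp [pvClosed]
  | cons x xs ih =>
    intro acc left
    rw [List.foldl_cons, ih, List.length_cons, pvClosed_succ]
    simp [pvLbl]

-- B's zip of adjacent boundaries gives the same closed-form labels.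
lemma bZip_eq (step : Int) (m : Nat) :
    (((List.range m).map (fun k : Nat => ((1 : Int) + (k : Int)) * step)).zip
        (((List.range m).map (fun k : Nat => ((1 : Int) + (k : Int)) * step)).drop 1)).map
      (fun p => PySem.Int.toStr p.1 ++ "-" ++ PySem.Int.toStr p.2)
    = pvClosed (m - 1) step step := by
  apply List.ext_getElem
  · simp [pvClosed, List.length_zip]
  intro k h1 h2
  simp only [pvClosed, List.getElem_map, List.getElem_zip, List.getElem_drop, List.getElem_range,
    pvLbl]
  have e1 : ((1 : Int) + (k : Int)) * step = step + (k : Int) * step := by ring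
  have e2 : ((1 : Int) + ((1 + k : Nat) : Int)) * step = step + (k : Int) * step + step := by
    push_cast; ring
  rw [e1, e2]

-- ===== VERDICT (by name: the statement is the Claim_ definition above) =====
theorem binLabelCreator_spec : Claim_equal_binLabelCreator := by
  intro amount step start _
  unfold Spec_binLabelCreator binLabelCreator binLabelCreator_alt
  simp only [PySem.List.pyRange_one, List.map_map]
  rw [aLoop_eq]
  have hmap : (List.range (amount + 1 - 1).toNat).map ((fun k : Int => k * step) ∘ fun k : Nat => 1 + (k : Int))
      = (List.range (amount + 1 - 1).toNat).map (fun k : Nat => ((1 : Int) + (k : Int)) * step) := by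
    simp [Function.comp]
  rw [hmap, bZip_eq]
  have hlen : ((List.range (amount - 1 - 0).toNat).map fun k : Nat => (0 : Int) + (k : Int)).length
      = (amount - 1 - 0).toNat := by simp
  rw [hlen]
  have : (amount - 1 - 0).toNat = (amount + 1 - 1).toNat - 1 := by omega
  rw [this]
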